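-- pv_equiv track=rewrite | github.com/N1teshift/ittweb | src/features/infrastructure/extraction/scripts/current/modules/external_items_generator.py | generate_external_items_ts_content
-- ===== SOURCE A (Python) =====
-- from typing import Dict, List, Set, Tuple
--
-- def normalize_item_id(item_id: str) -> str:
--     """Convert ITEM_XXX to kebab-case ID."""
--     if item_id.startswith("ITEM_"):
--         item_id = item_id[5:]
--     return item_id.lower().replace("_", "-")
--
-- def determine_category(item_id: str, item_name: str) -> Tuple[str, str | None]:
--     """Determine item category and subcategory from ID and name."""
--     item_lower = item_id.lower()
--     name_lower = item_name.lower()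
--
--     # Weapons
--     if any(x in item_lower for x in ["axe", "spear", "staff", "sword", "bow", "blowgun", "dagger"]):
--         return "weapons", None
--
--     # Armor
--     if any(x in item_lower for x in ["armor", "gloves", "boots", "coat", "shield", "helmet"]):
--         return "armor", None
--
--     # Potions
--     if any(x in item_lower for x in ["potion", "elixir", "brew"]):
--         return "potions", None
--
--     # Scrolls
--     if "scroll" in item_lower:
--         return "scrolls", None
--
--     # Raw materials
--     if any(x in item_lower for x in ["hide", "meat", "herb", "seed", "crystal", "essence", "ingot", "ore"]):
--         subcategory = None
--         if "herb" in item_lower or "seed" in item_lower: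
--             subcategory = "herbs"
--         elif "hide" in item_lower or "meat" in item_lower:
--             subcategory = "animal-parts"
--         return "raw-materials", subcategory
--
--     # Tools
--     if any(x in item_lower for x in ["net", "bomb", "trap", "kit", "lure"]):
--         return "tools", None
--
--     # Buildings
--     if any(x in item_lower for x in ["hut", "house", "forge", "workshop", "tower"]):
--         return "buildings", None
--
--     # Default to tools
--     return "tools", None
--
-- def format_item(item_id: str, item_name: str, category: str, subcategory: str | None = None) -> str:
--     """Format an item as TypeScript object."""
--     normalized_id = normalize_item_id(item_id)
--     category, subcategory = determine_category(normalized_id, item_name)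
--
--     lines = ["  {"]
--     lines.append(f"    id: '{normalized_id}',")
--     name_escaped = item_name.replace("'", "\\'")
--     lines.append(f"    name: '{name_escaped}',")
--     lines.append(f"    category: '{category}',")
--
--     if subcategory:
--         lines.append(f"    subcategory: '{subcategory}',")
--
--     lines.append(f"    description: 'Imported from game data.',")
--     lines.append("  },")
--
--     return "\n".join(lines)
--
-- def generate_external_items_ts_content(external_items: List[Tuple[str, str]]) -> str:
--     """Generate TypeScript content for items.external.ts file."""
--     content = """// Auto-generated from external/recipes.json
-- // Do not edit by hand. Re-generate via: python external/scripts/generate_external_items_from_recipes.py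
--
-- import type { ItemData } from '@/types/items';
--
-- export const EXTERNAL_ITEMS: ItemData[] = [
-- """
--
--     for item_id, item_name in sorted(external_items, key=lambda x: x[1]):
--         normalized_id = normalize_item_id(item_id)
--         category, subcategory = determine_category(normalized_id, item_name)
--         content += format_item(item_id, item_name, category, subcategory) + "\n"
--
--     content += "];\n"
--     return content
-- ===== SOURCE B (Python) =====
-- from typing import List, Tuple
--
-- # Priority-indexed flat keyword table: priority = index into _CATS (lower wins).
-- _CATS = ["weapons", "armor", "potions", "scrolls", "raw-materials", "tools", "buildings"]
-- _KEYWORDS = [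
--     ("axe", 0), ("spear", 0), ("staff", 0), ("sword", 0), ("bow", 0), ("blowgun", 0), ("dagger", 0),
--     ("armor", 1), ("gloves", 1), ("boots", 1), ("coat", 1), ("shield", 1), ("helmet", 1),
--     ("potion", 2), ("elixir", 2), ("brew", 2),
--     ("scroll", 3),
--     ("hide", 4), ("meat", 4), ("herb", 4), ("seed", 4), ("crystal", 4), ("essence", 4), ("ingot", 4), ("ore", 4),
--     ("net", 5), ("bomb", 5), ("trap", 5), ("kit", 5), ("lure", 5),
--     ("hut", 6), ("house", 6), ("forge", 6), ("workshop", 6), ("tower", 6),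
-- ]
-- _SUBS = ["herbs", "animal-parts"]
-- _SUBKEYWORDS = [("herb", 0), ("seed", 0), ("hide", 1), ("meat", 1)]
--
-- def _best(s: str, table, default: int) -> int:
--     """Single left-to-right scan of s: at each position test every keyword as a
--     prefix and keep the smallest priority seen (poor man's multi-pattern matcher)."""
--     best = default
--     for i in range(len(s)):
--         for kw, prio in table:
--             if prio < best and s.startswith(kw, i):
--                 best = prio
--     return best
--
-- def _classify(item_id: str):
--     s = item_id.lower()
--     b = _best(s, _KEYWORDS, len(_CATS))
--     category = _CATS[b] if b < len(_CATS) else "tools"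
--     if category != "raw-materials":
--         return category, None
--     sb = _best(s, _SUBKEYWORDS, len(_SUBS))
--     return category, _SUBS[sb] if sb < len(_SUBS) else None
--
-- def _render(item_id: str, item_name: str) -> str:
--     nid = item_id[5:] if item_id.startswith("ITEM_") else item_id
--     nid = nid.lower().replace("_", "-")
--     category, subcategory = _classify(nid)
--     subline = f"    subcategory: '{subcategory}',\n" if subcategory else ""
--     name = item_name.replace("'", "\\'")
--     return (
--         "  {\n"
--         f"    id: '{nid}',\n"
--         f"    name: '{name}',\n"
--         f"    category: '{category}',\n"
--         + subline +
--         "    description: 'Imported from game data.',\n"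
--         "  },\n"
--     )
--
-- def generate_external_items_ts_content(external_items: List[Tuple[str, str]]) -> str:
--     header = """// Auto-generated from external/recipes.json
-- // Do not edit by hand. Re-generate via: python external/scripts/generate_external_items_from_recipes.py
--
-- import type { ItemData } from '@/types/items';
--
-- export const EXTERNAL_ITEMS: ItemData[] = [
-- """
--     body = "".join(_render(i, n) for i, n in sorted(external_items, key=lambda x: x[1]))
--     return header + body + "];\n"
-- ===== Notes on version B (the rewrite author's own statement) =====
-- stated objective: alternative
-- what changed: Replaces the ordered any()-substring if-cascade categoriser by a single left-to-right scan of the id that tests every keyword of one flat priority-indexed table as a prefix at each position and keeps the minimum priority (arg-min multi-pattern matching over {category,subcategory} tables), and replaces the lines-list-join plus '+=' accumulation by one rendered block per item joined once.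
import Mathlib
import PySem

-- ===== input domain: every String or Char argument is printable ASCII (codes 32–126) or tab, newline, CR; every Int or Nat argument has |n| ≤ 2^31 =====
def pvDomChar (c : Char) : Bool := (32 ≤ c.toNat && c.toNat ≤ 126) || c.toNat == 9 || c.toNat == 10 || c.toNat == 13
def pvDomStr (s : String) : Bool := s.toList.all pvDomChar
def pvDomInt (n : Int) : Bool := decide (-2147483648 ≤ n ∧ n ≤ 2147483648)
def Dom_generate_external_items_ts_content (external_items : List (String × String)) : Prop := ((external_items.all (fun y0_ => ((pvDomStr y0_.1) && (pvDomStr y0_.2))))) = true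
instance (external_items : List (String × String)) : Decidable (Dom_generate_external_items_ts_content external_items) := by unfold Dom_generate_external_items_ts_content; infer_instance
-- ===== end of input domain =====

-- B replaces A's ordered any()-cascade categoriser with a single left-to-right scan of the
-- id that tests all keywords of a flat priority table at each position and keeps the
-- minimum priority (arg-min multi-pattern matching), and builds each item block directly
-- joined once (objective: alternative, same cost).

-- ===== PORT A =====
def pvHeader : String := "// Auto-generated from external/recipes.json\n// Do not edit by hand. Re-generate via: python external/scripts/generate_external_items_from_recipes.py\n\nimport type { ItemData } from '@/types/items';\n\nexport const EXTERNAL_ITEMS: ItemData[] = [\n"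

def pvNormalizeItemId (item_id : String) : String :=
  let item_id := if PySem.Str.startswith item_id "ITEM_" then PySem.Str.slice item_id (some 5) none else item_id
  PySem.Str.replace (PySem.Str.lower item_id) "_" "-"

def pvDetermineCategory (item_id : String) (item_name : String) : String × Option String :=
  let item_lower := PySem.Str.lower item_id
  let _name_lower := PySem.Str.lower item_name
  if ["axe", "spear", "staff", "sword", "bow", "blowgun", "dagger"].any (fun x => PySem.Str.isIn x item_lower) then
    ("weapons", none)
  else if ["armor", "gloves", "boots", "coat", "shield", "helmet"].any (fun x => PySem.Str.isIn x item_lower) then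
    ("armor", none)
  else if ["potion", "elixir", "brew"].any (fun x => PySem.Str.isIn x item_lower) then
    ("potions", none)
  else if PySem.Str.isIn "scroll" item_lower then
    ("scrolls", none)
  else if ["hide", "meat", "herb", "seed", "crystal", "essence", "ingot", "ore"].any (fun x => PySem.Str.isIn x item_lower) then
    let subcategory : Option String := none
    let subcategory :=
      if PySem.Str.isIn "herb" item_lower || PySem.Str.isIn "seed" item_lower then some "herbs"
      else if PySem.Str.isIn "hide" item_lower || PySem.Str.isIn "meat" item_lower then some "animal-parts"
      else subcategory
    ("raw-materials", subcategory)
  else if ["net", "bomb", "trap", "kit", "lure"].any (fun x => PySem.Str.isIn x item_lower) then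
    ("tools", none)
  else if ["hut", "house", "forge", "workshop", "tower"].any (fun x => PySem.Str.isIn x item_lower) then
    ("buildings", none)
  else
    ("tools", none)

def pvFormatItem (item_id : String) (item_name : String) (_category : String) (_subcategory : Option String) : String :=
  let normalized_id := pvNormalizeItemId item_id
  let cs := pvDetermineCategory normalized_id item_name
  let category := cs.1
  let subcategory := cs.2
  let lines : List String := ["  {"]
  let lines := lines ++ ["    id: '" ++ normalized_id ++ "',"]
  let name_escaped := PySem.Str.replace item_name "'" "\\'"
  let lines := lines ++ ["    name: '" ++ name_escaped ++ "',"]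
  let lines := lines ++ ["    category: '" ++ category ++ "',"]
  -- Python truthiness: `if subcategory:` is false for None and for ""
  let lines := match subcategory with
    | none => lines
    | some s => if s = "" then lines else lines ++ ["    subcategory: '" ++ s ++ "',"]
  let lines := lines ++ ["    description: 'Imported from game data.',"]
  let lines := lines ++ ["  },"]
  PySem.Str.join "\n" lines

def generate_external_items_ts_content (external_items : List (String × String)) : String :=
  let content := pvHeader
  let content := (PySem.List.sorted external_items (fun x => x.2) false).foldl
    (fun content p =>
      let normalized_id := pvNormalizeItemId p.1
      let cs := pvDetermineCategory normalized_id p.2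
      content ++ pvFormatItem p.1 p.2 cs.1 cs.2 ++ "\n") content
  content ++ "];\n"

-- ===== PORT B =====
def pvCats : List String := ["weapons", "armor", "potions", "scrolls", "raw-materials", "tools", "buildings"]

def pvKeywords : List (String × Nat) :=
  [("axe", 0), ("spear", 0), ("staff", 0), ("sword", 0), ("bow", 0), ("blowgun", 0), ("dagger", 0),
   ("armor", 1), ("gloves", 1), ("boots", 1), ("coat", 1), ("shield", 1), ("helmet", 1),
   ("potion", 2), ("elixir", 2), ("brew", 2),
   ("scroll", 3),
   ("hide", 4), ("meat", 4), ("herb", 4), ("seed", 4), ("crystal", 4), ("essence", 4), ("ingot", 4), ("ore", 4),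
   ("net", 5), ("bomb", 5), ("trap", 5), ("kit", 5), ("lure", 5),
   ("hut", 6), ("house", 6), ("forge", 6), ("workshop", 6), ("tower", 6)]

def pvSubs : List String := ["herbs", "animal-parts"]

def pvSubKeywords : List (String × Nat) := [("herb", 0), ("seed", 0), ("hide", 1), ("meat", 1)]

-- inner loop of _best at one position: Python's s.startswith(kw, i) is kw-prefix-of-the-i-th-suffix
def pvBestAt (suffix : List Char) (table : List (String × Nat)) (best : Nat) : Nat :=
  table.foldl (fun best e => if e.2 < best && e.1.toList.isPrefixOf suffix then e.2 else best) best

-- outer loop of _best: i = 0 .. len(s)-1, i.e. all nonempty suffixes left to right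
def pvBestScan : List Char → List (String × Nat) → Nat → Nat
  | [], _, best => best
  | c :: cs, table, best => pvBestScan cs table (pvBestAt (c :: cs) table best)

def pvClassify (item_id : String) : String × Option String :=
  let s := (PySem.Str.lower item_id).toList
  let b := pvBestScan s pvKeywords 7
  let category := if b < 7 then pvCats.getD b "tools" else "tools"
  if category ≠ "raw-materials" then (category, none)
  else
    let sb := pvBestScan s pvSubKeywords 2
    (category, if sb < 2 then some (pvSubs.getD sb "") else none)

def pvRender (item_id : String) (item_name : String) : String :=
  let nid := if PySem.Str.startswith item_id "ITEM_" then PySem.Str.slice item_id (some 5) none else item_id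
  let nid := PySem.Str.replace (PySem.Str.lower nid) "_" "-"
  let cs := pvClassify nid
  -- Python truthiness: the subcategory line only for a non-None, non-empty subcategory
  let subline := match cs.2 with
    | none => ""
    | some s => if s = "" then "" else "    subcategory: '" ++ s ++ "',\n"
  let name := PySem.Str.replace item_name "'" "\\'"
  "  {\n" ++ "    id: '" ++ nid ++ "',\n" ++ "    name: '" ++ name ++ "',\n" ++
    "    category: '" ++ cs.1 ++ "',\n" ++ subline ++
    "    description: 'Imported from game data.',\n" ++ "  },\n"

def generate_external_items_ts_content_alt (external_items : List (String × String)) : String :=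
  let body := PySem.Str.join ""
    ((PySem.List.sorted external_items (fun x => x.2) false).map (fun p => pvRender p.1 p.2))
  pvHeader ++ body ++ "];\n"

-- ===== PRECONDITION & SPEC =====
def Spec_generate_external_items_ts_content (external_items : List (String × String)) (out : String) : Prop := out = generate_external_items_ts_content_alt external_items
instance (external_items : List (String × String)) (out : String) : Decidable (Spec_generate_external_items_ts_content external_items out) := by unfold Spec_generate_external_items_ts_content; infer_instance

-- ===== CLAIM (what is proved, stated in full; the proofs are below) =====
def Claim_equal_generate_external_items_ts_content : Prop := ∀ (external_items : List (String × String)), Dom_generate_external_items_ts_content external_items → Spec_generate_external_items_ts_content external_items (generate_external_items_ts_content external_items)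

-- ===== LEMMAS AND PROOFS =====

-- conditional-min fold: the shape both loops of B's _best reduce to
def pvCondMin (f : String → Bool) (t : List (String × Nat)) (b : Nat) : Nat :=
  t.foldl (fun b e => if f e.1 then min e.2 b else b) b

theorem pvCondMin_le_base (f : String → Bool) (t : List (String × Nat)) (b : Nat) :
    pvCondMin f t b ≤ b := by
  induction t generalizing b with
  | nil => simp [pvCondMin]
  | cons e t ih =>
    simp only [pvCondMin, List.foldl_cons] at *
    split
    · exact le_trans (ih _) (min_le_right _ _)
    · exact ih b

theorem pvCondMin_le_mem (f : String → Bool) (t : List (String × Nat)) (b : Nat)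
    (e : String × Nat) (he : e ∈ t) (hf : f e.1 = true) : pvCondMin f t b ≤ e.2 := by
  induction t generalizing b with
  | nil => cases he
  | cons e' t ih =>
    simp only [pvCondMin, List.foldl_cons] at *
    rcases List.mem_cons.mp he with rfl | he'
    · rw [if_pos hf]
      exact le_trans (pvCondMin_le_base f t _) (min_le_left _ _)
    · split
      · exact ih _ he'
      · exact ih _ he'

theorem pvLe_condMin (f : String → Bool) (t : List (String × Nat)) (b x : Nat)
    (hb : x ≤ b) (h : ∀ e ∈ t, f e.1 = true → x ≤ e.2) : x ≤ pvCondMin f t b := by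
  induction t generalizing b with
  | nil => simpa [pvCondMin]
  | cons e t ih =>
    simp only [pvCondMin, List.foldl_cons] at *
    split
    · next hf =>
      exact ih _ (le_min (h e (List.mem_cons_self) hf) hb) (fun e' he' => h e' (List.mem_cons_of_mem _ he'))
    · exact ih _ hb (fun e' he' => h e' (List.mem_cons_of_mem _ he'))

-- two conditional-min passes over the same table fuse into one with the disjunction
theorem pvCondMin_fuse (P Q : String → Bool) (t : List (String × Nat)) (b : Nat) :
    pvCondMin Q t (pvCondMin P t b) = pvCondMin (fun k => P k || Q k) t b := by
  apply le_antisymm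
  · apply pvLe_condMin
    · exact le_trans (pvCondMin_le_base _ _ _) (pvCondMin_le_base _ _ _)
    · intro e he hf
      rcases Bool.or_eq_true_iff.mp hf with hP | hQ
      · exact le_trans (pvCondMin_le_base Q t _) (pvCondMin_le_mem P t b e he hP)
      · exact pvCondMin_le_mem Q t _ e he hQ
  · apply pvLe_condMin
    · apply pvLe_condMin
      · exact pvCondMin_le_base _ _ _
      · intro e he hP
        exact pvCondMin_le_mem _ t b e he (by simp [hP])
    · intro e he hQ
      exact pvCondMin_le_mem _ t b e he (by simp [hQ])

theorem pvCondMin_congr (f g : String → Bool) (t : List (String × Nat)) (b : Nat)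
    (h : ∀ e ∈ t, f e.1 = g e.1) : pvCondMin f t b = pvCondMin g t b := by
  induction t generalizing b with
  | nil => rfl
  | cons e t ih =>
    simp only [pvCondMin, List.foldl_cons] at *
    rw [h e (List.mem_cons_self)]
    exact ih _ (fun e' he' => h e' (List.mem_cons_of_mem _ he'))

theorem pvCondMin_false (f : String → Bool) (t : List (String × Nat)) (b : Nat)
    (h : ∀ e ∈ t, f e.1 = false) : pvCondMin f t b = b := by
  induction t with
  | nil => rfl
  | cons e t ih =>
    simp only [pvCondMin, List.foldl_cons] at *
    rw [h e (List.mem_cons_self), if_neg (by simp)]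
    exact ih (fun e' he' => h e' (List.mem_cons_of_mem _ he'))

-- the inner position loop is a conditional min over the table
theorem pvBestAt_eq (s : List Char) (t : List (String × Nat)) (b : Nat) :
    pvBestAt s t b = pvCondMin (fun kw => kw.toList.isPrefixOf s) t b := by
  unfold pvBestAt pvCondMin
  congr 1
  funext b e
  by_cases hp : e.1.toList.isPrefixOf s
  · simp only [hp, Bool.and_true, if_true]
    by_cases hl : e.2 < b
    · simp [hl, Nat.min_eq_left (le_of_lt hl)]
    · simp [hl, Nat.min_eq_right (le_of_not_gt hl)]
  · simp [hp]

-- 'kw in (c::cs)' is 'kw is a prefix here, or kw in cs' — the step the position scan takes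
theorem pvIsIn_cons (kw : List Char) (c : Char) (cs : List Char) :
    PySem.Chars.isIn kw (c :: cs) = (kw.isPrefixOf (c :: cs) || PySem.Chars.isIn kw cs) := by
  rw [Bool.eq_iff_iff]
  simp [PySem.Chars.isIn_iff_infix, List.infix_cons_iff, List.isPrefixOf_iff_prefix]

-- the whole scan computes the min priority of the keywords occurring as substrings
theorem pvBestScan_eq (s : List Char) (t : List (String × Nat)) (b : Nat)
    (hne : ∀ e ∈ t, e.1.toList ≠ []) :
    pvBestScan s t b = pvCondMin (fun kw => PySem.Chars.isIn kw.toList s) t b := by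
  induction s generalizing b with
  | nil =>
    rw [pvBestScan]
    refine (pvCondMin_false _ _ _ ?_).symm
    intro e he
    rw [PySem.Chars.isIn_eq_false_iff]
    intro hinf
    exact hne e he (List.eq_nil_of_infix_nil hinf)
  | cons c cs ih =>
    rw [pvBestScan, ih _, pvBestAt_eq, pvCondMin_fuse]
    apply pvCondMin_congr
    intro e _
    exact (pvIsIn_cons e.1.toList c cs).symm

theorem pvCondMin_append (f : String → Bool) (t1 t2 : List (String × Nat)) (b : Nat) :
    pvCondMin f (t1 ++ t2) b = pvCondMin f t2 (pvCondMin f t1 b) := by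
  simp [pvCondMin, List.foldl_append]

-- a same-priority group contributes `if any then min p b else b`
theorem pvCondMin_cons (f : String → Bool) (e : String × Nat) (t : List (String × Nat)) (b : Nat) :
    pvCondMin f (e :: t) b = pvCondMin f t (if f e.1 then min e.2 b else b) := rfl

theorem pvCondMin_group (kws : List String) (p : Nat) (f : String → Bool) (b : Nat) :
    pvCondMin f (kws.map (fun k => (k, p))) b = if kws.any f then min p b else b := by
  induction kws generalizing b with
  | nil => simp [pvCondMin]
  | cons k ks ih =>
    rw [List.map_cons, pvCondMin_cons]
    by_cases hk : f k
    · rw [if_pos hk, ih]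
      rcases Bool.eq_false_or_eq_true (ks.any f) with h | h <;>
        simp [List.any_cons, h, hk]
    · rw [if_neg hk, ih]
      simp [List.any_cons, hk]

-- abbreviation used only in the proofs: "some keyword of the group occurs in s"
def pvAny (kws : List String) (s : List Char) : Bool :=
  kws.any (fun k => PySem.Chars.isIn k.toList s)

-- the category scan evaluated group by group
theorem pvBestScan_keywords (s : List Char) :
    pvBestScan s pvKeywords 7 =
      (fun x => if pvAny ["hut", "house", "forge", "workshop", "tower"] s then min 6 x else x)
      ((fun x => if pvAny ["net", "bomb", "trap", "kit", "lure"] s then min 5 x else x)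
      ((fun x => if pvAny ["hide", "meat", "herb", "seed", "crystal", "essence", "ingot", "ore"] s then min 4 x else x)
      ((fun x => if pvAny ["scroll"] s then min 3 x else x)
      ((fun x => if pvAny ["potion", "elixir", "brew"] s then min 2 x else x)
      ((fun x => if pvAny ["armor", "gloves", "boots", "coat", "shield", "helmet"] s then min 1 x else x)
      ((fun x => if pvAny ["axe", "spear", "staff", "sword", "bow", "blowgun", "dagger"] s then min 0 x else x) 7)))))) := by
  rw [pvBestScan_eq s pvKeywords 7 (by decide)]
  rw [show pvKeywords =
      ((["axe", "spear", "staff", "sword", "bow", "blowgun", "dagger"].map (fun k => (k, 0)) ++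
        ["armor", "gloves", "boots", "coat", "shield", "helmet"].map (fun k => (k, 1)) ++
        ["potion", "elixir", "brew"].map (fun k => (k, 2)) ++
        ["scroll"].map (fun k => (k, 3)) ++
        ["hide", "meat", "herb", "seed", "crystal", "essence", "ingot", "ore"].map (fun k => (k, 4)) ++
        ["net", "bomb", "trap", "kit", "lure"].map (fun k => (k, 5)) ++
        ["hut", "house", "forge", "workshop", "tower"].map (fun k => (k, 6))) : List (String × Nat)) from rfl]
  simp only [pvCondMin_append, pvCondMin_group, pvAny]
  rfl

-- the subcategory scan evaluated group by group
theorem pvBestScan_subKeywords (s : List Char) :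
    pvBestScan s pvSubKeywords 2 =
      (fun x => if pvAny ["hide", "meat"] s then min 1 x else x)
      ((fun x => if pvAny ["herb", "seed"] s then min 0 x else x) 2) := by
  rw [pvBestScan_eq s pvSubKeywords 2 (by decide)]
  rw [show pvSubKeywords =
      ((["herb", "seed"].map (fun k => (k, 0)) ++ ["hide", "meat"].map (fun k => (k, 1))) : List (String × Nat)) from rfl]
  simp only [pvCondMin_append, pvCondMin_group, pvAny]
  rfl

-- bridges from A's Str-level tests to the pvAny groups of the evaluated scan
theorem pvAny_eq (kws : List String) (t : String) :
    (kws.any fun x => PySem.Str.isIn x t) = pvAny kws t.toList := by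
  simp [pvAny]

theorem pvAny_one (x : String) (t : String) :
    PySem.Str.isIn x t = pvAny [x] t.toList := by
  simp [pvAny]

theorem pvAny_two (x y : String) (t : String) :
    (PySem.Str.isIn x t || PySem.Str.isIn y t) = pvAny [x, y] t.toList := by
  simp [pvAny]

-- the cascade equals the arg-min table lookup
theorem pvClassify_eq (item_id : String) (item_name : String) :
    pvDetermineCategory item_id item_name = pvClassify item_id := by
  unfold pvDetermineCategory pvClassify
  dsimp only
  rw [pvBestScan_keywords, pvBestScan_subKeywords]
  rw [pvAny_two "herb" "seed", pvAny_two "hide" "meat", pvAny_one "scroll"]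
  simp only [pvAny_eq]
  generalize pvAny ["axe", "spear", "staff", "sword", "bow", "blowgun", "dagger"] (PySem.Str.lower item_id).toList = a0
  generalize pvAny ["armor", "gloves", "boots", "coat", "shield", "helmet"] (PySem.Str.lower item_id).toList = a1
  generalize pvAny ["potion", "elixir", "brew"] (PySem.Str.lower item_id).toList = a2
  generalize pvAny ["scroll"] (PySem.Str.lower item_id).toList = a3
  generalize pvAny ["hide", "meat", "herb", "seed", "crystal", "essence", "ingot", "ore"] (PySem.Str.lower item_id).toList = a4
  generalize pvAny ["net", "bomb", "trap", "kit", "lure"] (PySem.Str.lower item_id).toList = a5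
  generalize pvAny ["hut", "house", "forge", "workshop", "tower"] (PySem.Str.lower item_id).toList = a6
  generalize pvAny ["herb", "seed"] (PySem.Str.lower item_id).toList = aH
  generalize pvAny ["hide", "meat"] (PySem.Str.lower item_id).toList = aM
  revert a0 a1 a2 a3 a4 a5 a6 aH aM
  decide

-- A's per-item block plus its newline equals B's rendered block
theorem pvJoin_cons (c : String) (cs : List String) :
    PySem.Str.join "" (c :: cs) = c ++ PySem.Str.join "" cs := by
  apply String.toList_inj.mp
  cases cs <;> simp [PySem.Str.join, PySem.Chars.join, List.intercalate]

theorem pvRender_eq (item_id item_name : String) (c : String) (sub : Option String) :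
    pvFormatItem item_id item_name c sub ++ "\n" = pvRender item_id item_name := by
  simp only [pvFormatItem, pvRender]
  rw [show (PySem.Str.replace (PySem.Str.lower (if PySem.Str.startswith item_id "ITEM_" then PySem.Str.slice item_id (some 5) none else item_id)) "_" "-") = pvNormalizeItemId item_id from rfl]
  rw [show pvClassify (pvNormalizeItemId item_id) = pvDetermineCategory (pvNormalizeItemId item_id) item_name from (pvClassify_eq _ _).symm]
  generalize pvDetermineCategory (pvNormalizeItemId item_id) item_name = cs
  obtain ⟨cat, _ | sb⟩ := cs
  · apply String.toList_inj.mp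
    simp [PySem.Str.join, PySem.Chars.join, List.intercalate]
  · by_cases hs : sb = "" <;>
    · apply String.toList_inj.mp
      simp [hs, PySem.Str.join, PySem.Chars.join, List.intercalate]

-- the accumulating loop is the join of the mapped renders
theorem pvFold_join (l : List (String × String)) (acc : String) :
    l.foldl (fun content p =>
      let normalized_id := pvNormalizeItemId p.1
      let cs := pvDetermineCategory normalized_id p.2
      content ++ pvFormatItem p.1 p.2 cs.1 cs.2 ++ "\n") acc
    = acc ++ PySem.Str.join "" (l.map (fun p => pvRender p.1 p.2)) := by
  induction l generalizing acc with
  | nil => simp [PySem.Str.join, PySem.Chars.join, List.intercalate]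
  | cons x xs ih =>
    rw [List.foldl_cons, ih, List.map_cons, pvJoin_cons]
    dsimp only
    rw [String.append_assoc (s₁ := acc), pvRender_eq, String.append_assoc]

-- ===== VERDICT (by name: the statement is the Claim_ definition above) =====
theorem generate_external_items_ts_content_spec : Claim_equal_generate_external_items_ts_content := by
  intro xs _
  unfold Spec_generate_external_items_ts_content generate_external_items_ts_content
    generate_external_items_ts_content_alt
  dsimp only
  rw [pvFold_join, String.append_assoc]
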